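-- pv_equiv track=rewrite | github.com/julienbld/pycado | src/parse.py | get_call_to_dict
-- ===== SOURCE A (Python) =====
-- g_expr_sep = [" ", "(", ")", "+", "-", '*', "/", ","];
--
-- g_prefixes = ["va_", "pt_", "ln_", "ve_", "cs_", "ci_", "el_", \
--                 "sp_", "su_", "so_", "ob_", "fn_", "pa_"]
--
-- def has_pycado_prefix(var):
--   if isinstance(var, str):
--     for pref in g_prefixes:
--       if var.startswith(pref):
--         return True
--   return False
--
-- def get_call_to_dict(a_instr):
--   if isinstance(a_instr, str):
--     l_new_instr = ""
--     l_current_str = ""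
--     l_str = a_instr + " "
--     for c in l_str:
--       if c in g_expr_sep:
--         if l_current_str != "":
--           if has_pycado_prefix(l_current_str):
--             l_current_str = "g_i['" + l_current_str + "'].obj"
--           else:
--             try:
--               float(l_current_str)
--             except ValueError:
--               l_current_str = "'" + l_current_str + "'"
--
--           l_new_instr += l_current_str
--           l_current_str = ""
--         l_new_instr += c
--
--       else:
--         l_current_str += c
--     return l_new_instr
--
--   elif isinstance(a_instr, list):
--     l_instrs = []
--     for elt in a_instr:
--       l_instrs.append(get_call_to_dict(elt))
--
--     return l_instrs
--   else:
--     return a_instr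
-- ===== SOURCE B (Python) =====
-- g_expr_sep = [" ", "(", ")", "+", "-", '*', "/", ","]
--
-- g_prefixes = ["va_", "pt_", "ln_", "ve_", "cs_", "ci_", "el_", \
--                 "sp_", "su_", "so_", "ob_", "fn_", "pa_"]
--
-- def _transform(tok):
--   if tok[:3] in g_prefixes:
--     return "g_i['" + tok + "'].obj"
--   try:
--     float(tok)
--     return tok
--   except ValueError:
--     return "'" + tok + "'"
--
-- def get_call_to_dict(a_instr):
--   if isinstance(a_instr, str):
--     s = a_instr + " "
--     n = len(s)
--     parts = []
--     pos = 0
--     while pos < n: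
--       j = pos
--       while j < n and s[j] not in g_expr_sep:
--         j += 1
--       if j == n:
--         break
--       if j > pos:
--         parts.append(_transform(s[pos:j]))
--       parts.append(s[j])
--       pos = j + 1
--     return "".join(parts)
--   elif isinstance(a_instr, list):
--     return [get_call_to_dict(elt) for elt in a_instr]
--   else:
--     return a_instr
-- ===== Notes on version B (the rewrite author's own statement) =====
-- stated objective: alternative
-- what changed: B replaces A's character-by-character accumulator loop with a two-pointer scan that finds the next separator, slices out the whole token, transforms it and joins the collected parts, and tests the pycado prefix by tok[:3] membership in g_prefixes instead of a startswith scan.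
import Mathlib
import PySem

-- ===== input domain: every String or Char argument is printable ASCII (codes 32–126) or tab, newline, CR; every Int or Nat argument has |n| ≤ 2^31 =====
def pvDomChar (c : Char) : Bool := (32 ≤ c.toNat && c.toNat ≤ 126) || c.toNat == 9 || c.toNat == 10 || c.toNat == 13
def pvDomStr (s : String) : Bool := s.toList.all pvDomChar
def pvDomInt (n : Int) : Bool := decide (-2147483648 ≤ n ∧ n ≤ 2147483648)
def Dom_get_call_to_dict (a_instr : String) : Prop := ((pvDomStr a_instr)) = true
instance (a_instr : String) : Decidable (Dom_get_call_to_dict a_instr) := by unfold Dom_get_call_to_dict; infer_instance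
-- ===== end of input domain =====

-- B replaces A's char-by-char accumulator loop with a two-pointer scan (find the next
-- separator, slice out the whole token, transform, join the parts) and tests the pycado
-- prefix by `tok[:3] in g_prefixes`; objective: alternative (same cost, different shape).

-- ===== PORT A =====
-- g_expr_sep
def gExprSep : List Char := [' ', '(', ')', '+', '-', '*', '/', ',']
-- `c in g_expr_sep`
def isSep (c : Char) : Bool := gExprSep.contains c
-- g_prefixes
def gPrefixes : List String :=
  ["va_", "pt_", "ln_", "ve_", "cs_", "ci_", "el_", "sp_", "su_", "so_", "ob_", "fn_", "pa_"]
-- has_pycado_prefix (str branch; the argument here is always a str)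
def hasPycadoPrefix (t : List Char) : Bool :=
  gPrefixes.any (fun p => PySem.Chars.startswith t p.toList)

-- Python's float(s) validity (A's try/except ValueError), hand-ported (PySem has no float
-- parser): strip whitespace, optional sign, then inf/infinity/nan (case-insensitive) or a
-- decimal literal (digit runs with single underscores between digits, optional '.',
-- optional exponent), maximal-munch recursive-descent style. Exact for ASCII input.
-- after one digit: further digits, or '_' that must be followed by a digit; stop otherwise
def pdCont : List Char → Option (List Char)
  | [] => some []
  | c :: r =>
    if c = '_' then
      match r with
      | [] => none
      | d :: r2 => if d.isDigit then pdCont r2 else none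
    else if c.isDigit then pdCont r else some (c :: r)

-- a nonempty digit run (underscores between digits); returns the rest
def parseDigits : List Char → Option (List Char)
  | c :: r => if c.isDigit then pdCont r else none
  | [] => none

-- optional exponent part, must consume everything
def expOk : List Char → Bool
  | [] => true
  | c :: r =>
    if c = 'e' ∨ c = 'E' then
      let r' := match r with
        | s :: r2 => if s = '+' ∨ s = '-' then r2 else s :: r2
        | [] => []
      match parseDigits r' with
      | some [] => true
      | _ => false
    else false

def floatCore (s : List Char) : Bool :=
  if PySem.Chars.lower s = "inf".toList ∨ PySem.Chars.lower s = "infinity".toList ∨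
      PySem.Chars.lower s = "nan".toList then true
  else
    match s with
    | '.' :: r =>
      (match parseDigits r with
       | some rest => expOk rest
       | none => false)
    | _ =>
      match parseDigits s with
      | some ('.' :: r2) =>
        (match r2 with
         | c :: _ =>
           if c.isDigit then
             (match parseDigits r2 with
              | some rest => expOk rest
              | none => false)
           else expOk r2
         | [] => expOk [])
      | some rest => expOk rest
      | none => false

def floatOk (t : List Char) : Bool :=
  floatCore
    (match PySem.Chars.strip t with
     | c :: r => if c = '+' ∨ c = '-' then r else c :: r
     | [] => [])

-- the body of A's `if l_current_str != ""` block (prefix wrap / float probe / quoting)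
def aTransform (cur : List Char) : List Char :=
  if hasPycadoPrefix cur then "g_i['".toList ++ cur ++ "'].obj".toList
  else if floatOk cur then cur
  else '\'' :: (cur ++ ['\''])

-- A's `for c in l_str` loop with state (l_new_instr, l_current_str)
def aLoop : List Char → List Char → List Char → List Char
  | [], newI, _cur => newI
  | c :: rest, newI, cur =>
    if isSep c then
      aLoop rest (newI ++ (if cur = [] then [] else aTransform cur) ++ [c]) []
    else
      aLoop rest newI (cur ++ [c])

def get_call_to_dict (a_instr : String) : String :=
  String.ofList (aLoop (a_instr.toList ++ [' ']) [] [])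

-- ===== PORT B =====
-- `s[j] not in g_expr_sep`
def bSep (c : Char) : Bool :=
  c == ' ' || c == '(' || c == ')' || c == '+' || c == '-' || c == '*' || c == '/' || c == ','
def bNotSep (c : Char) : Bool := !bSep c
-- g_prefixes, as 3-char lists for B's `tok[:3] in g_prefixes`
def bPrefixes : List (List Char) :=
  ["va_".toList, "pt_".toList, "ln_".toList, "ve_".toList, "cs_".toList, "ci_".toList,
   "el_".toList, "sp_".toList, "su_".toList, "so_".toList, "ob_".toList, "fn_".toList,
   "pa_".toList]

-- B's hand-port of float(s) validity (Source B's try/except): same grammar, checked by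
-- slicing out maximal digit/underscore blocks with takeWhile/dropWhile and validating a
-- block by head/last/adjacency predicates. Exact for ASCII input.
def bDigU (c : Char) : Bool := c.isDigit || c == '_'
-- a valid digit run: nonempty, digits/underscores only, digit at both ends, no "__"
def bRun (t : List Char) : Bool :=
  !t.isEmpty && (t.headD '_').isDigit && (t.getLastD '_').isDigit &&
    t.all bDigU && (t.zip t.tail).all (fun p => p.1.isDigit || p.2.isDigit)
-- drop one leading sign
def bSign (s : List Char) : List Char :=
  if s.headD ' ' == '+' || s.headD ' ' == '-' then s.tail else s
-- split positions: the scan for the exponent marker and for the decimal point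
def bNotE (x : Char) : Bool := !(x == 'e' || x == 'E')
def bNotDot (x : Char) : Bool := x != '.'
-- mantissa: [digit run] ['.' [digit run]] with at least one digit overall
def bMant (m : List Char) : Bool :=
  match m.dropWhile bNotDot with
  | [] => bRun (m.takeWhile bNotDot)
  | _ :: fr =>
    ((m.takeWhile bNotDot).isEmpty || bRun (m.takeWhile bNotDot)) &&
      (fr.isEmpty || bRun fr) && !((m.takeWhile bNotDot).isEmpty && fr.isEmpty)
-- exponent: absent, or the marker followed by an optional sign and one digit run
def bExpPart : List Char → Bool
  | [] => true
  | _ :: ex => bRun (bSign ex)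

def bFloatCore (u : List Char) : Bool :=
  if PySem.Chars.lower u = "inf".toList ∨ PySem.Chars.lower u = "infinity".toList ∨
      PySem.Chars.lower u = "nan".toList then true
  else bMant (u.takeWhile bNotE) && bExpPart (u.dropWhile bNotE)

def bFloat (xs : List Char) : Bool := bFloatCore (bSign (PySem.Chars.strip xs))

-- Source B's _transform
def bTransform (w : List Char) : List Char :=
  if bPrefixes.contains (w.take 3) then "g_i['".toList ++ w ++ "'].obj".toList
  else if bFloat w then w
  else "'".toList ++ w ++ "'".toList

-- Source B's outer while loop: slice out the token before the next separator, emit its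
-- transform and the separator, continue after it; the inner `while s[j] not in …` scan
-- and the slice s[pos:j] are the takeWhile/dropWhile pair
def bLoop (s : List Char) (parts : List (List Char)) : List (List Char) :=
  match _h : s.dropWhile bNotSep with
  | [] => parts
  | c :: rest =>
    bLoop rest
      (parts ++ (if (s.takeWhile bNotSep).isEmpty then [[c]]
                 else [bTransform (s.takeWhile bNotSep), [c]]))
termination_by s.length
decreasing_by
  have hle := List.length_dropWhile_le bNotSep s
  rw [_h] at hle
  simp at hle
  omega

def get_call_to_dict_alt (a_instr : String) : String :=
  String.ofList (List.flatten (bLoop (a_instr.toList ++ [' ']) []))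

-- ===== PRECONDITION & SPEC =====
def Spec_get_call_to_dict (a_instr : String) (out : String) : Prop := out = get_call_to_dict_alt a_instr
instance (a_instr : String) (out : String) : Decidable (Spec_get_call_to_dict a_instr out) := by unfold Spec_get_call_to_dict; infer_instance

-- ===== CLAIM (what is proved, stated in full; the proofs are below) =====
def Claim_equal_get_call_to_dict : Prop := ∀ (a_instr : String), Dom_get_call_to_dict a_instr → Spec_get_call_to_dict a_instr (get_call_to_dict a_instr)

-- ===== LEMMAS AND PROOFS =====

lemma bSep_eq (c : Char) : bSep c = isSep c := by
  simp [bSep, isSep, gExprSep, Bool.or_assoc, Bool.or_comm, Bool.or_left_comm, Bool.beq_eq_decide_eq]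

-- proof-only: validity of a digit-run continuation (what may follow an already-seen digit)
def bCont (b : List Char) : Bool :=
  b.all bDigU && (b.getLastD '0').isDigit && (b.zip b.tail).all (fun p => p.1.isDigit || p.2.isDigit)

lemma bCont_digit_cons {c : Char} (hc : c.isDigit = true) (b : List Char) :
    bCont (c :: b) = bCont b := by
  cases b with
  | nil => simp [bCont, bDigU, hc]
  | cons d bs => simp [bCont, bDigU, hc, List.getLast?_cons, Bool.and_assoc]

lemma bCont_us_digit {c : Char} (hc : c.isDigit = true) (b : List Char) :
    bCont ('_' :: c :: b) = bCont b := by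
  rw [show bCont ('_' :: c :: b) = bCont (c :: b) from ?_, bCont_digit_cons hc]
  cases b with
  | nil => simp [bCont, bDigU, hc]
  | cons d bs => simp [bCont, bDigU, hc, List.getLast?_cons, Bool.and_assoc]

lemma bCont_uu (b : List Char) : bCont ('_' :: '_' :: b) = false := by
  simp [bCont]

lemma bRun_digit_cons {c : Char} (hc : c.isDigit = true) (b : List Char) :
    bRun (c :: b) = bCont b := by
  cases b with
  | nil => simp [bRun, bCont, bDigU, hc]
  | cons d bs => simp [bRun, bCont, bDigU, hc, List.getLast?_cons, Bool.and_assoc, Bool.and_comm]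

lemma bRun_nil : bRun [] = false := by simp [bRun]

lemma bRun_us (b : List Char) : bRun ('_' :: b) = false := by
  simp [bRun]

lemma bCont_us_nil : bCont ['_'] = false := by decide

lemma pdCont_eq (s : List Char) :
    pdCont s = if bCont (s.takeWhile bDigU) then some (s.dropWhile bDigU) else none := by
  induction hn : s.length using Nat.strong_induction_on generalizing s with
  | _ n IH =>
  cases s with
  | nil => simp [pdCont, bCont]
  | cons c r =>
    by_cases hcu : c = '_'
    · subst hcu
      cases r with
      | nil => simp [pdCont, bCont_us_nil, bDigU]
      | cons d r2 =>
        by_cases hd : d.isDigit = true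
        · rw [show pdCont ('_' :: d :: r2) = pdCont r2 by rw [pdCont.eq_def]; simp [hd]]
          rw [IH r2.length (by rw [← hn]; simp [List.length_cons]) r2 rfl]
          simp [bDigU, hd, bCont_us_digit hd]
        · rw [show pdCont ('_' :: d :: r2) = none by rw [pdCont.eq_def]; simp [hd]]
          by_cases hdu : d = '_'
          · subst hdu
            simp [bDigU, bCont_uu]
          · simp [bDigU, hd, hdu, bCont_us_nil]
    · by_cases hc : c.isDigit = true
      · rw [show pdCont (c :: r) = pdCont r by rw [pdCont.eq_def]; simp [hcu, hc]]
        rw [IH r.length (by rw [← hn]; simp [List.length_cons]) r rfl]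
        simp [bDigU, hc, bCont_digit_cons hc]
      · have hdu : bDigU c = false := by simp [bDigU, hc, hcu]
        rw [show pdCont (c :: r) = some (c :: r) by rw [pdCont.eq_def]; simp [hcu, hc]]
        simp [hdu, bCont]

lemma parseDigits_eq (s : List Char) :
    parseDigits s = if bRun (s.takeWhile bDigU) then some (s.dropWhile bDigU) else none := by
  cases s with
  | nil => simp [parseDigits, bRun_nil]
  | cons c r =>
    by_cases hc : c.isDigit = true
    · rw [show parseDigits (c :: r) = pdCont r by simp [parseDigits, hc], pdCont_eq r]
      simp [bDigU, hc, bRun_digit_cons hc]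
    · rw [show parseDigits (c :: r) = none by simp [parseDigits, hc]]
      by_cases hcu : c = '_'
      · subst hcu; simp [bDigU, bRun_us]
      · have hdu : bDigU c = false := by simp [bDigU, hc, hcu]
        simp [hdu, bRun_nil]

lemma sign_eq (s : List Char) :
    (match s with
     | c :: r => if c = '+' ∨ c = '-' then r else c :: r
     | [] => []) = bSign s := by
  cases s with
  | nil => simp [bSign]
  | cons c r =>
    by_cases hc : c = '+' ∨ c = '-'
    · rcases hc with h | h <;> simp [bSign, h]
    · simp only [not_or] at hc
      simp [bSign, hc.1, hc.2]

-- proof-only: A's float grammar re-stated over maximal digit/underscore blocks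
-- (floatCore with parseDigits replaced by its takeWhile/dropWhile image); the bridge
-- between A's recursive-descent parser and B's e/dot-split recognizer
def midExp (r : List Char) : Bool :=
  match r with
  | [] => true
  | c :: r1 =>
    (c == 'e' || c == 'E') &&
      (bRun ((bSign r1).takeWhile bDigU) && ((bSign r1).dropWhile bDigU).isEmpty)

def midRest (d : List Char) : Bool :=
  match d with
  | '.' :: r2 =>
    (match r2 with
     | c :: _ =>
       if c.isDigit then bRun (r2.takeWhile bDigU) && midExp (r2.dropWhile bDigU)
       else midExp r2
     | [] => midExp [])
  | rest => midExp rest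

def midCore (s : List Char) : Bool :=
  if PySem.Chars.lower s = "inf".toList ∨ PySem.Chars.lower s = "infinity".toList ∨
      PySem.Chars.lower s = "nan".toList then true
  else if s.headD ' ' == '.' then
    bRun (s.tail.takeWhile bDigU) && midExp (s.tail.dropWhile bDigU)
  else bRun (s.takeWhile bDigU) && midRest (s.dropWhile bDigU)

lemma expOk_eq (r : List Char) : expOk r = midExp r := by
  cases r with
  | nil => rfl
  | cons c r1 =>
    by_cases hce : c = 'e' ∨ c = 'E'
    · rw [show expOk (c :: r1) =
            (match parseDigits (match r1 with
               | s :: r2 => if s = '+' ∨ s = '-' then r2 else s :: r2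
               | [] => []) with
             | some [] => true
             | _ => false) by simp [expOk, hce]]
      rw [sign_eq r1, parseDigits_eq]
      have hce' : (c == 'e' || c == 'E') = true := by
        rcases hce with h | h <;> simp [h]
      by_cases hb : bRun ((bSign r1).takeWhile bDigU)
      · cases hdw : (bSign r1).dropWhile bDigU with
        | nil => simp [midExp, hb, hdw, hce']
        | cons x xs => simp [midExp, hb, hdw, hce']
      · simp [midExp, hb, hce']
    · have hce' : (c == 'e' || c == 'E') = false := by
        simp only [not_or] at hce
        simp [hce.1, hce.2]
      simp [expOk, hce, midExp, hce']

lemma matchNone_eq (b : Bool) (y : List Char) (f : List Char → Bool) :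
    (match (if b then some y else none : Option (List Char)) with
     | some rest => f rest
     | none => false) = (b && f y) := by
  by_cases hb : b <;> simp [hb]

lemma core_mid (s : List Char) : floatCore s = midCore s := by
  rw [floatCore.eq_def, midCore.eq_def]
  by_cases hinf : PySem.Chars.lower s = "inf".toList ∨ PySem.Chars.lower s = "infinity".toList ∨
      PySem.Chars.lower s = "nan".toList
  · rw [if_pos hinf, if_pos hinf]
  · rw [if_neg hinf, if_neg hinf]
    cases s with
    | nil => simp [parseDigits, bRun_nil, midRest, midExp]
    | cons c r =>
      by_cases hc : c = '.'
      · subst hc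
        simp only [parseDigits_eq, matchNone_eq, List.headD_cons, List.tail_cons,
          beq_self_eq_true, if_true]
        by_cases hb : bRun (r.takeWhile bDigU) <;> simp [hb, expOk_eq]
      · have hcb : (c == '.') = false := by simp [hc]
        simp only [parseDigits_eq (c :: r), List.headD_cons, List.tail_cons, hcb,
          Bool.false_eq_true, if_false]
        by_cases hb : bRun ((c :: r).takeWhile bDigU)
        · simp only [hb, if_true, Bool.true_and]
          cases hdw : (c :: r).dropWhile bDigU with
          | nil => simp [hc, expOk_eq, midRest, midExp]
          | cons x xs =>
            by_cases hx : x = '.'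
            · subst hx
              cases xs with
              | nil => simp [hc, expOk_eq, midRest, midExp]
              | cons y ys =>
                by_cases hy : y.isDigit = true <;>
                  simp [hc, hy, parseDigits_eq, matchNone_eq, expOk_eq, midRest]
            · simp [hc, hx, expOk_eq, midRest]
        · simp [hc, hb]

-- ---- bridging midCore to B's split-based recognizer ----

lemma notE_dot : bNotE '.' = true := by decide
lemma notDot_dot : bNotDot '.' = false := by decide

lemma midRest_nil : midRest [] = true := by simp [midRest, midExp]

lemma midRest_dot_nil : midRest ['.'] = true := by simp [midRest, midExp]

lemma midRest_dot_cons (c2 : Char) (cs2 : List Char) :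
    midRest ('.' :: c2 :: cs2) =
      if c2.isDigit then
        bRun ((c2 :: cs2).takeWhile bDigU) && midExp ((c2 :: cs2).dropWhile bDigU)
      else midExp (c2 :: cs2) := by
  rw [midRest.eq_def]
  simp

lemma midRest_other (c : Char) (cs : List Char) (h : ¬ c = '.') :
    midRest (c :: cs) = midExp (c :: cs) := by
  rw [midRest.eq_def]
  simp [h]

lemma tw_mono (p q : Char → Bool) (h : ∀ x, q x = true → p x = true) (t : List Char) :
    t.takeWhile p = t.takeWhile q ++ (t.dropWhile q).takeWhile p := by
  induction t with
  | nil => rfl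
  | cons x xs ih =>
    by_cases hq : q x = true
    · simp [hq, h x hq, ih]
    · simp [List.takeWhile_cons, hq]

lemma dw_mono (p q : Char → Bool) (h : ∀ x, q x = true → p x = true) (t : List Char) :
    t.dropWhile p = (t.dropWhile q).dropWhile p := by
  induction t with
  | nil => rfl
  | cons x xs ih =>
    by_cases hq : q x = true
    · simp [hq, h x hq, ih]
    · simp [List.dropWhile_cons, hq]

lemma tw_all_append (p : Char → Bool) (l1 l2 : List Char) (h : ∀ x ∈ l1, p x = true) :
    (l1 ++ l2).takeWhile p = l1 ++ l2.takeWhile p := by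
  induction l1 with
  | nil => rfl
  | cons a as ih =>
    simp only [List.cons_append, List.takeWhile_cons, h a (by simp)]
    simp [ih (fun x hx => h x (by simp [hx]))]

lemma dropWhile_head (p : Char → Bool) (t : List Char) (c : Char) (cs : List Char)
    (h : t.dropWhile p = c :: cs) : p c = false := by
  induction t with
  | nil => cases h
  | cons x xs ih =>
    by_cases hx : p x = true
    · exact ih (by simpa [List.dropWhile_cons, hx] using h)
    · rw [List.dropWhile_cons] at h
      simp only [hx] at h
      simp only [Bool.false_eq_true, if_false] at h
      injection h with h1 _
      subst h1
      simpa using hx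

lemma bRun_all (t : List Char) (h : bRun t = true) : ∀ x ∈ t, bDigU x = true := by
  simp only [bRun, Bool.and_eq_true, List.all_eq_true] at h
  exact h.1.2

lemma bRun_ne_nil (t : List Char) (h : bRun t = true) : t.isEmpty = false := by
  simp only [bRun, Bool.and_eq_true] at h
  simpa using h.1.1.1.1

lemma bRun_mem_false (t : List Char) (x : Char) (hx : x ∈ t) (h : bDigU x = false) :
    bRun t = false := by
  cases hr : bRun t with
  | false => rfl
  | true => rw [bRun_all t hr x hx] at h; cases h

lemma bRun_head_false (c : Char) (cs : List Char) (h : c.isDigit = false) :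
    bRun (c :: cs) = false := by
  simp [bRun, h]

lemma bRun_split (t : List Char) :
    bRun t = (bRun (t.takeWhile bDigU) && (t.dropWhile bDigU).isEmpty) := by
  cases hd : t.dropWhile bDigU with
  | nil =>
    have htw : t.takeWhile bDigU = t := by
      rw [List.takeWhile_eq_self_iff]
      exact List.dropWhile_eq_nil_iff.mp hd
    simp [htw]
  | cons c cs =>
    have hc := dropWhile_head bDigU t c cs hd
    have hmem : c ∈ t := (List.dropWhile_sublist bDigU (l := t)).subset (hd ▸ List.mem_cons_self)
    simp [bRun_mem_false t c hmem hc]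

lemma digU_notE (x : Char) (h : bDigU x = true) : bNotE x = true := by
  simp only [bDigU, Bool.or_eq_true, beq_iff_eq] at h
  rcases h with h | h
  · simp only [bNotE, Bool.not_eq_eq_eq_not, Bool.not_true, Bool.or_eq_false_iff, beq_eq_false_iff_ne]
    constructor <;> rintro rfl <;> exact absurd h (by decide)
  · subst h; decide

lemma digU_notDot (x : Char) (h : bDigU x = true) : bNotDot x = true := by
  simp only [bDigU, Bool.or_eq_true, beq_iff_eq] at h
  rcases h with h | h
  · simp only [bNotDot, bne_iff_ne, ne_eq]
    rintro rfl; exact absurd h (by decide)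
  · subst h; decide

lemma notE_false (c : Char) (h : bNotE c = false) : c = 'e' ∨ c = 'E' := by
  simp only [bNotE, Bool.not_eq_false', Bool.or_eq_true, beq_iff_eq] at h
  exact h

lemma notE_digU_false (c : Char) (h : bNotE c = false) : bDigU c = false := by
  rcases notE_false c h with h | h <;> subst h <;> decide

-- if the digit/underscore block is a valid run, the e-split passes over it whole
lemma twE_of_run (r : List Char) :
    r.takeWhile bNotE = r.takeWhile bDigU ++ (r.dropWhile bDigU).takeWhile bNotE :=
  tw_mono bNotE bDigU digU_notE r

lemma twU_of_runE (r : List Char) (hb : bRun (r.takeWhile bNotE) = true) :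
    r.takeWhile bDigU = r.takeWhile bNotE := by
  have hall : ∀ x ∈ r.takeWhile bNotE, bDigU x = true := bRun_all _ hb
  have hsplit : r.takeWhile bNotE ++ r.dropWhile bNotE = r := List.takeWhile_append_dropWhile
  have h1 : r.takeWhile bDigU =
      ((r.takeWhile bNotE ++ r.dropWhile bNotE).takeWhile bDigU) := by rw [hsplit]
  rw [h1, tw_all_append bDigU _ _ hall]
  cases hd : r.dropWhile bNotE with
  | nil => simp
  | cons c cs =>
    have hc := dropWhile_head bNotE r c cs hd
    simp [notE_digU_false c hc]

-- the '.'-free tail shape shared by midCore's branches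
lemma core_piece (r : List Char) :
    (bRun (r.takeWhile bDigU) && midExp (r.dropWhile bDigU)) =
      ((!(r.takeWhile bNotE).isEmpty && bRun (r.takeWhile bNotE)) &&
        bExpPart (r.dropWhile bNotE)) := by
  by_cases hb : bRun (r.takeWhile bDigU) = true
  · have htwE := twE_of_run r
    have hdwE : r.dropWhile bNotE = (r.dropWhile bDigU).dropWhile bNotE :=
      dw_mono bNotE bDigU digU_notE r
    cases hdu : r.dropWhile bDigU with
    | nil =>
      rw [htwE, hdwE, hdu]
      simp [hb, midExp, bExpPart, bRun_ne_nil _ hb]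
    | cons c cs =>
      have hc : bDigU c = false := dropWhile_head _ _ _ _ hdu
      by_cases he : bNotE c = true
      · have hguard : (c == 'e' || c == 'E') = false := by
          simpa [bNotE] using he
        have hmem : c ∈ r.takeWhile bNotE := by
          rw [htwE, hdu]
          simp [he]
        rw [bRun_mem_false _ c hmem hc]
        simp [hb, midExp, hguard]
      · have he' : bNotE c = false := by simpa using he
        have hguard : (c == 'e' || c == 'E') = true := by
          rcases notE_false c he' with h | h <;> simp [h]
        rw [htwE, hdwE, hdu]
        simp only [List.takeWhile_cons, he', Bool.false_eq_true, if_false, List.append_nil,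
          List.dropWhile_cons]
        simp [hb, midExp, hguard, bExpPart, bRun_ne_nil _ hb, bRun_split (bSign cs)]
  · have hb' : bRun (r.takeWhile bDigU) = false := by simpa using hb
    by_cases hrE : bRun (r.takeWhile bNotE) = true
    · rw [twU_of_runE r hrE] at hb'
      rw [hrE] at hb'; cases hb'
    · have hrE' : bRun (r.takeWhile bNotE) = false := by simpa using hrE
      simp [hb', hrE']

-- a non-digit, non-dot character inside the pre-dot part kills the mantissa
lemma bMant_bad (m : List Char) (c : Char) (hmem : c ∈ m.takeWhile bNotDot)
    (hc : bDigU c = false) : bMant m = false := by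
  rw [bMant.eq_def]
  cases hf : m.dropWhile bNotDot with
  | nil =>
    have htw : m.takeWhile bNotDot = m := by
      rw [List.takeWhile_eq_self_iff]
      exact List.dropWhile_eq_nil_iff.mp hf
    rw [htw] at hmem
    simp [bRun_mem_false m c hmem hc, htw]
  | cons d fr =>
    have hip : bRun (m.takeWhile bNotDot) = false := bRun_mem_false _ c hmem hc
    have hne : (m.takeWhile bNotDot).isEmpty = false := by
      cases hq : m.takeWhile bNotDot with
      | nil => rw [hq] at hmem; cases hmem
      | cons _ _ => rfl
    simp [hip, hne]

lemma dropWhile_all_sep (p : Char → Bool) (cur rest : List Char) (c : Char)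
    (h : ∀ x ∈ cur, p x = true) (hc : p c = false) :
    (cur ++ c :: rest).dropWhile p = c :: rest := by
  induction cur with
  | nil => simp [hc]
  | cons a t ih =>
    simp only [List.cons_append, List.dropWhile_cons, h a (by simp)]
    exact ih (fun x hx => h x (by simp [hx]))

lemma takeWhile_all_sep (p : Char → Bool) (cur rest : List Char) (c : Char)
    (h : ∀ x ∈ cur, p x = true) (hc : p c = false) :
    (cur ++ c :: rest).takeWhile p = cur := by
  induction cur with
  | nil => simp [hc]
  | cons a t ih =>
    simp only [List.cons_append, List.takeWhile_cons, h a (by simp)]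
    simp [ih (fun x hx => h x (by simp [hx]))]

lemma bMant_run (b : List Char) (hall : ∀ x ∈ b, bDigU x = true) : bMant b = bRun b := by
  have hdD : b.dropWhile bNotDot = [] :=
    List.dropWhile_eq_nil_iff.mpr (fun x hx => digU_notDot x (hall x hx))
  have htD : b.takeWhile bNotDot = b :=
    List.takeWhile_eq_self_iff.mpr (fun x hx => digU_notDot x (hall x hx))
  rw [bMant.eq_def, hdD]
  simp [htD]

lemma mid_new (s : List Char) : midCore s = bFloatCore s := by
  rw [midCore.eq_def, bFloatCore.eq_def]
  by_cases hinf : PySem.Chars.lower s = "inf".toList ∨ PySem.Chars.lower s = "infinity".toList ∨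
      PySem.Chars.lower s = "nan".toList
  · rw [if_pos hinf, if_pos hinf]
  · rw [if_neg hinf, if_neg hinf]
    cases s with
    | nil => simp [bRun_nil, bMant, bExpPart, midRest_nil]
    | cons c0 s' =>
      by_cases hc0 : c0 = '.'
      · subst hc0
        simp only [List.headD_cons, beq_self_eq_true, if_true, List.tail_cons]
        have h1 : (('.' :: s').takeWhile bNotE) = '.' :: s'.takeWhile bNotE := by
          rw [List.takeWhile_cons, if_pos notE_dot]
        have h2 : (('.' :: s').dropWhile bNotE) = s'.dropWhile bNotE := by
          rw [List.dropWhile_cons, if_pos notE_dot]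
        rw [h1, h2]
        have h3 : ('.' :: s'.takeWhile bNotE).dropWhile bNotDot =
            '.' :: s'.takeWhile bNotE := by
          rw [List.dropWhile_cons]
          simp [notDot_dot]
        rw [bMant.eq_def, h3]
        have h4 : ('.' :: s'.takeWhile bNotE).takeWhile bNotDot = [] := by
          rw [List.takeWhile_cons]
          simp [notDot_dot]
        simp only [h4, core_piece s']
        cases hfr : s'.takeWhile bNotE <;> simp [bRun_nil]
      · have hcb : (c0 == '.') = false := by simp [hc0]
        simp only [List.headD_cons, hcb, Bool.false_eq_true, if_false]
        by_cases hb : bRun ((c0 :: s').takeWhile bDigU) = true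
        · have hballU := bRun_all _ hb
          have hbne := bRun_ne_nil _ hb
          have htwE := twE_of_run (c0 :: s')
          have hdwE : (c0 :: s').dropWhile bNotE =
              ((c0 :: s').dropWhile bDigU).dropWhile bNotE :=
            dw_mono bNotE bDigU digU_notE (c0 :: s')
          cases hdu : (c0 :: s').dropWhile bDigU with
          | nil =>
            rw [htwE, hdwE, hdu]
            simp only [List.takeWhile_nil, List.append_nil, List.dropWhile_nil]
            rw [bMant_run _ hballU]
            simp [hb, midRest_nil, bExpPart]
          | cons c cs =>
            have hc : bDigU c = false := dropWhile_head _ _ _ _ hdu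
            by_cases hcd : c = '.'
            · subst hcd
              have hbdot : ∀ x ∈ (c0 :: s').takeWhile bDigU, bNotDot x = true :=
                fun x hx => digU_notDot x (hballU x hx)
              have hdE1 : ('.' :: cs).takeWhile bNotE = '.' :: cs.takeWhile bNotE := by
                rw [List.takeWhile_cons, if_pos notE_dot]
              have hdE2 : ('.' :: cs).dropWhile bNotE = cs.dropWhile bNotE := by
                rw [List.dropWhile_cons, if_pos notE_dot]
              have hip : ((c0 :: s').takeWhile bDigU ++
                  '.' :: cs.takeWhile bNotE).takeWhile bNotDot =
                  (c0 :: s').takeWhile bDigU :=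
                takeWhile_all_sep bNotDot _ _ '.' hbdot notDot_dot
              have hfr : ((c0 :: s').takeWhile bDigU ++
                  '.' :: cs.takeWhile bNotE).dropWhile bNotDot =
                  '.' :: cs.takeWhile bNotE :=
                dropWhile_all_sep bNotDot _ _ '.' hbdot notDot_dot
              rw [htwE, hdwE, hdu, hdE1, hdE2, bMant.eq_def, hfr]
              simp only [hip, hbne, hb, Bool.false_or, Bool.false_and, Bool.true_and,
                Bool.not_false, Bool.and_true]
              cases cs with
              | nil =>
                simp [midRest_dot_nil, bExpPart]
              | cons c2 cs2 =>
                rw [midRest_dot_cons]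
                by_cases h2 : c2.isDigit = true
                · rw [if_pos h2, core_piece (c2 :: cs2)]
                  have hne2 : bNotE c2 = true := digU_notE c2 (by simp [bDigU, h2])
                  rw [List.takeWhile_cons, if_pos hne2]
                  simp
                · rw [if_neg h2]
                  by_cases he2 : bNotE c2 = true
                  · have hg2 : (c2 == 'e' || c2 == 'E') = false := by
                      simpa [bNotE] using he2
                    rw [List.takeWhile_cons, if_pos he2]
                    simp [midExp, hg2, bRun_head_false c2 _ (by simpa using h2)]
                  · have he2' : bNotE c2 = false := by simpa using he2
                    have hg2 : (c2 == 'e' || c2 == 'E') = true := by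
                      rcases notE_false c2 he2' with h | h <;> simp [h]
                    rw [List.takeWhile_cons, List.dropWhile_cons]
                    simp only [he2', Bool.false_eq_true, if_false]
                    simp [midExp, hg2, bExpPart, bRun_split (bSign cs2)]
            · by_cases he : bNotE c = true
              · have hguard : (c == 'e' || c == 'E') = false := by simpa [bNotE] using he
                have hcdot : bNotDot c = true := by simp [bNotDot, hcd]
                have hl1 : ∀ x ∈ (c0 :: s').takeWhile bDigU ++ [c], bNotDot x = true := by
                  intro x hx
                  rcases List.mem_append.1 hx with hx | hx
                  · exact digU_notDot x (hballU x hx)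
                  · simp at hx; subst hx; exact hcdot
                have htwE2 : (c0 :: s').takeWhile bNotE =
                    ((c0 :: s').takeWhile bDigU ++ [c]) ++ (cs.takeWhile bNotE) := by
                  rw [htwE, hdu]
                  simp [List.takeWhile_cons, he, List.append_assoc]
                have hmem : c ∈ ((c0 :: s').takeWhile bNotE).takeWhile bNotDot := by
                  rw [htwE2, tw_all_append bNotDot _ _ hl1]
                  exact List.mem_append.2 (Or.inl (by simp))
                rw [bMant_bad _ c hmem hc, midRest_other c cs hcd]
                simp [midExp, hguard]
              · have he' : bNotE c = false := by simpa using he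
                have hguard : (c == 'e' || c == 'E') = true := by
                  rcases notE_false c he' with h | h <;> simp [h]
                rw [htwE, hdwE, hdu]
                rw [show (c :: cs).takeWhile bNotE = [] from by
                    rw [List.takeWhile_cons]; simp [he'],
                  show (c :: cs).dropWhile bNotE = c :: cs from by
                    rw [List.dropWhile_cons]; simp [he']]
                rw [List.append_nil, bMant_run _ hballU, midRest_other c cs hcd]
                simp [hb, midExp, hguard, bExpPart, bRun_split (bSign cs)]
        · have hb' : bRun ((c0 :: s').takeWhile bDigU) = false := by simpa using hb
          have hm : bMant ((c0 :: s').takeWhile bNotE) = false := by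
            cases hmv : bMant ((c0 :: s').takeWhile bNotE) with
            | false => rfl
            | true =>
              exfalso
              rw [bMant.eq_def] at hmv
              cases hfD : ((c0 :: s').takeWhile bNotE).dropWhile bNotDot with
              | nil =>
                rw [hfD] at hmv
                simp only [] at hmv
                have htD : ((c0 :: s').takeWhile bNotE).takeWhile bNotDot =
                    (c0 :: s').takeWhile bNotE := by
                  rw [List.takeWhile_eq_self_iff]
                  exact List.dropWhile_eq_nil_iff.mp hfD
                rw [htD] at hmv
                rw [twU_of_runE _ hmv] at hb'
                rw [hmv] at hb'; cases hb'
              | cons d fr =>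
                rw [hfD] at hmv
                simp only [Bool.and_eq_true, Bool.or_eq_true] at hmv
                have hdd : bNotDot d = false := dropWhile_head _ _ _ _ hfD
                have hdd' : d = '.' := by simpa [bNotDot] using hdd
                cases hipc : ((c0 :: s').takeWhile bNotE).takeWhile bNotDot with
                | nil =>
                  have h5 : (c0 :: s').takeWhile bNotE = d :: fr := by
                    conv_lhs => rw [← List.takeWhile_append_dropWhile
                      (p := bNotDot) (l := (c0 :: s').takeWhile bNotE)]
                    rw [hipc, hfD]; rfl
                  have h6 : bNotE c0 = true := by
                    by_cases h7 : bNotE c0 = true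
                    · exact h7
                    · rw [List.takeWhile_cons] at h5
                      simp [h7] at h5
                  rw [List.takeWhile_cons, if_pos h6] at h5
                  injection h5 with h8 _
                  exact hc0 (h8.trans hdd')
                | cons i0 ip =>
                  rcases hmv.1.1 with hive | hrun
                  · rw [hipc] at hive; simp at hive
                  · rw [hipc] at hrun
                    have hallip : ∀ x ∈ (i0 :: ip : List Char), bDigU x = true :=
                      bRun_all _ hrun
                    have hsplit2 : (c0 :: s') =
                        (i0 :: ip) ++ (d :: (fr ++ (c0 :: s').dropWhile bNotE)) := by
                      conv_lhs => rw [← List.takeWhile_append_dropWhile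
                        (p := bNotE) (l := c0 :: s')]
                      conv_lhs => rw [← List.takeWhile_append_dropWhile
                        (p := bNotDot) (l := (c0 :: s').takeWhile bNotE)]
                      rw [hipc, hfD]
                      simp [List.append_assoc]
                    have htwU : (c0 :: s').takeWhile bDigU = i0 :: ip := by
                      conv_lhs => rw [hsplit2]
                      rw [tw_all_append bDigU _ _ hallip]
                      have hz : ((d :: (fr ++ (c0 :: s').dropWhile bNotE)) :
                          List Char).takeWhile bDigU = [] := by
                        rw [List.takeWhile_cons, hdd']
                        simp [bDigU]
                      rw [hz, List.append_nil]
                    rw [htwU, hrun] at hb'; cases hb'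
          rw [hm]
          simp [hb']

lemma core_eq (s : List Char) : floatCore s = bFloatCore s := by
  rw [core_mid, mid_new]

lemma floatOk_eq (t : List Char) : floatOk t = bFloat t := by
  unfold floatOk bFloat
  rw [sign_eq]
  exact core_eq _

lemma startswith_take3 (w p : List Char) (hp : p.length = 3) :
    PySem.Chars.startswith w p = (w.take 3 == p) := by
  rw [Bool.eq_iff_iff, PySem.Chars.startswith_iff, beq_iff_eq, List.prefix_iff_eq_take, hp]
  exact eq_comm

lemma prefix_eq (w : List Char) : hasPycadoPrefix w = bPrefixes.contains (w.take 3) := by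
  simp only [hasPycadoPrefix, gPrefixes, bPrefixes, List.any_cons, List.any_nil,
    List.contains_cons, List.contains_nil]
  rw [startswith_take3 _ _ rfl, startswith_take3 _ _ rfl, startswith_take3 _ _ rfl,
    startswith_take3 _ _ rfl, startswith_take3 _ _ rfl, startswith_take3 _ _ rfl,
    startswith_take3 _ _ rfl, startswith_take3 _ _ rfl, startswith_take3 _ _ rfl,
    startswith_take3 _ _ rfl, startswith_take3 _ _ rfl, startswith_take3 _ _ rfl,
    startswith_take3 _ _ rfl]

lemma transform_eq (w : List Char) : aTransform w = bTransform w := by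
  unfold aTransform bTransform
  rw [prefix_eq, floatOk_eq]
  rfl

lemma bLoop_append (s : List Char) (p q : List (List Char)) :
    bLoop s (p ++ q) = p ++ bLoop s q := by
  induction hn : s.length using Nat.strong_induction_on generalizing s p q with
  | _ n IH =>
  unfold bLoop
  cases hd : s.dropWhile bNotSep with
  | nil => simp
  | cons c rest =>
    simp only []
    have hlen : rest.length < n := by
      have hle := List.length_dropWhile_le bNotSep s
      rw [hd] at hle
      simp at hle
      omega
    rw [List.append_assoc]
    exact IH rest.length hlen rest p _ rfl

lemma aLoop_eq (l : List Char) :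
    ∀ (cur N : List Char), (∀ c ∈ cur, bNotSep c = true) →
      aLoop l N cur = N ++ List.flatten (bLoop (cur ++ l) []) := by
  induction l with
  | nil =>
    intro cur N h
    have hdw : cur.dropWhile bNotSep = [] := by
      rw [List.dropWhile_eq_nil_iff]; exact fun x hx => h x hx
    have hbl : bLoop cur [] = [] := by
      rw [bLoop.eq_def]
      cases hd : cur.dropWhile bNotSep with
      | nil => simp
      | cons c' rest' => rw [hdw] at hd; cases hd
    simp [aLoop, hbl]
  | cons c rest ih =>
    intro cur N h
    by_cases hc : isSep c = true
    · have hnc : bNotSep c = false := by simp [bNotSep, bSep_eq, hc]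
      have hall : (cur ++ c :: rest).dropWhile bNotSep = c :: rest :=
        dropWhile_all_sep bNotSep cur rest c h hnc
      have hbl : bLoop (cur ++ c :: rest) [] =
          (if cur.isEmpty then [[c]] else [bTransform cur, [c]]) ++ bLoop rest [] := by
        rw [bLoop.eq_def]
        cases hd : (cur ++ c :: rest).dropWhile bNotSep with
        | nil => rw [hall] at hd; cases hd
        | cons c' rest' =>
          rw [hall] at hd
          injection hd with h1 h2
          subst h1; subst h2
          rw [takeWhile_all_sep bNotSep cur rest c h hnc]
          have hba := bLoop_append rest
            (if cur.isEmpty then [[c]] else [bTransform cur, [c]]) []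
          simp only [List.append_nil] at hba
          simpa using hba
      rw [show aLoop (c :: rest) N cur =
            aLoop rest (N ++ (if cur = [] then [] else aTransform cur) ++ [c]) [] by
          simp [aLoop, hc]]
      rw [ih [] _ (by simp), hbl]
      by_cases hcur : cur = []
      · subst hcur; simp
      · rw [transform_eq]
        simp [hcur, List.isEmpty_iff, List.append_assoc]
    · have hnc : bNotSep c = true := by simp [bNotSep, bSep_eq, hc]
      rw [show aLoop (c :: rest) N cur = aLoop rest N (cur ++ [c]) by simp [aLoop, hc]]
      rw [ih (cur ++ [c]) N (by
        intro x hx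
        rcases List.mem_append.1 hx with hx | hx
        · exact h x hx
        · simp at hx; subst hx; exact hnc)]
      simp

-- ===== VERDICT (by name: the statement is the Claim_ definition above) =====
theorem get_call_to_dict_spec : Claim_equal_get_call_to_dict := by
  intro a_instr _
  unfold Spec_get_call_to_dict get_call_to_dict get_call_to_dict_alt
  rw [aLoop_eq (a_instr.toList ++ [' ']) [] [] (by simp)]
  simp
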